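-- pv_equiv track=rewrite | github.com/DuarteDomingues/Cyber-Security-Projects | tp1/CS_Modulo01_Grupo04/mod1_ex4_1.py | oneZerosPadding
-- ===== SOURCE A (Python) =====
-- def oneZerosPadding(mi, l):
--     c=0
--     while (len(mi) < l):
--
--         if ( c==0):
--             mi = mi + '1'
--
--         else :
--             mi = mi + '0'
--
--         c=c+1
--     return mi
-- ===== SOURCE B (Python) =====
-- def oneZerosPadding(mi, l):
--     if len(mi) >= l:
--         return mi
--     return mi + '1' + '0' * (l - len(mi) - 1)
-- ===== Notes on version B (the rewrite author's own statement) =====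
-- stated objective: simpler
-- what changed: Replaces the per-character while loop with counter by a closed-form concatenation: one '1' plus '0' * (l - len(mi) - 1) built at once.
import Mathlib
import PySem

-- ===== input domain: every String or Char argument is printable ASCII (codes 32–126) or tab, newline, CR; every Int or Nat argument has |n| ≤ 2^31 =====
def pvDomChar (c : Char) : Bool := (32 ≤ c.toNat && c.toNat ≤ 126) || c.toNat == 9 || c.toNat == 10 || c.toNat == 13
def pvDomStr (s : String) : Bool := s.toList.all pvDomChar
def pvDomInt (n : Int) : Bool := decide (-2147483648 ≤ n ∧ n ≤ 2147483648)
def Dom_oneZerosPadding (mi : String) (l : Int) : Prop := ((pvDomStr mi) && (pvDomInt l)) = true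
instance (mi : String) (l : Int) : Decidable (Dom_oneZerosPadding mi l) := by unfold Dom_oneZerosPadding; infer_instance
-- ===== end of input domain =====

-- B replaces A's per-character while loop with a closed-form concatenation (simpler).


-- ===== PORT A =====
-- the while loop: state (mi, c); appends '1' on the first pass, '0' afterwards
def oneZerosPaddingLoop (mi : List Char) (l : Int) (c : Int) : List Char :=
  if (mi.length : Int) < l then
    oneZerosPaddingLoop (mi ++ [if c = 0 then '1' else '0']) l (c + 1)
  else mi
termination_by (l - mi.length).toNat
decreasing_by simp; omega

def oneZerosPadding (mi : String) (l : Int) : String :=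
  String.ofList (oneZerosPaddingLoop mi.toList l 0)

-- ===== PORT B =====
def oneZerosPadding_alt (mi : String) (l : Int) : String :=
  if (mi.toList.length : Int) ≥ l then mi
  else String.ofList (mi.toList ++ '1' :: List.replicate (l - mi.toList.length - 1).toNat '0')

-- ===== PRECONDITION & SPEC =====
def Spec_oneZerosPadding (mi : String) (l : Int) (out : String) : Prop := out = oneZerosPadding_alt mi l
instance (mi : String) (l : Int) (out : String) : Decidable (Spec_oneZerosPadding mi l out) := by unfold Spec_oneZerosPadding; infer_instance

-- ===== CLAIM (what is proved, stated in full; the proofs are below) =====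
def Claim_equal_oneZerosPadding : Prop := ∀ (mi : String) (l : Int), Dom_oneZerosPadding mi l → Spec_oneZerosPadding mi l (oneZerosPadding mi l)

-- ===== LEMMAS AND PROOFS =====

-- once c ≠ 0 the loop only appends '0's: closed form
lemma oneZerosPaddingLoop_zeros (l : Int) :
    ∀ (n : Nat) (s : List Char) (c : Int), (l - s.length).toNat = n → 0 < c →
      oneZerosPaddingLoop s l c = s ++ List.replicate n '0' := by
  intro n
  induction n with
  | zero =>
    intro s c hn hc
    rw [oneZerosPaddingLoop]
    rw [if_neg (by omega)]
    simp
  | succ n ih =>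
    intro s c hn hc
    rw [oneZerosPaddingLoop]
    rw [if_pos (by omega)]
    rw [if_neg (by omega : ¬ c = 0)]
    rw [ih (s ++ ['0']) (c + 1) (by simp only [List.length_append, List.length_cons, List.length_nil]; omega) (by omega)]
    simp [List.replicate_succ]

-- ===== VERDICT (by name: the statement is the Claim_ definition above) =====
theorem oneZerosPadding_spec : Claim_equal_oneZerosPadding := by
  intro mi l _
  unfold Spec_oneZerosPadding oneZerosPadding oneZerosPadding_alt
  by_cases h : (mi.toList.length : Int) ≥ l
  · rw [if_pos h]
    rw [oneZerosPaddingLoop]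
    rw [if_neg (by omega)]
    simp
  · rw [if_neg h]
    rw [oneZerosPaddingLoop]
    rw [if_pos (by omega)]
    rw [if_pos rfl]
    rw [oneZerosPaddingLoop_zeros l (l - mi.toList.length - 1).toNat (mi.toList ++ ['1']) (0 + 1)
        (by simp only [List.length_append, List.length_cons, List.length_nil]; omega) (by omega)]
    simp
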